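-- pv_equiv track=rewrite | github.com/lucastemb/leetcode-solutions | 2950-number-of-divisible-substrings/2950-number-of-divisible-substrings.py | countDivisibleSubstrings
-- ===== SOURCE A (Python) =====
-- def countDivisibleSubstrings(word: str) -> int:
--     dic={"a":1, "b":1, "c":2, "d":2, "e":2, "f":3, "g":3, "h":3, "i":4, "j":4, "k":4, "l":5, "m":5, "n":5, "o":6, "p":6, "q":6, "r":7, "s":7, "t":7, "u": 8, "v": 8, "w":8, "x":9, "y":9, "z":9}
--     res=0
--     for i in range(len(word)):
--         running_count=0
--         for j in range(i, len(word)):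
--             running_count+=dic[word[j]]
--             if running_count % len(word[i:j+1]) == 0:
--                 res+=1
--     return res
-- ===== SOURCE B (Python) =====
-- def countDivisibleSubstrings(word: str) -> int:
--     # O(9n): a substring's sum is divisible by its length iff its average is
--     # some k in 1..9; for each k count equal prefix sums of (value - k).
--     vals = [(ord(c) - 96) // 3 + 1 for c in word]
--     res = 0
--     for k in range(1, 10):
--         cnt = {0: 1}
--         p = 0
--         for v in vals:
--             p += v - k
--             res += cnt.get(p, 0)
--             cnt[p] = cnt.get(p, 0) + 1
--     return res
-- ===== Notes on version B (the rewrite author's own statement) =====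
-- stated objective: faster
-- what changed: A enumerates all O(n^2) substrings with a running sum; B makes one linear pass per possible average k in 1..9, counting pairs of equal prefix sums of (value-k) with a dictionary, so the inner scan over start positions disappears.
import Mathlib
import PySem

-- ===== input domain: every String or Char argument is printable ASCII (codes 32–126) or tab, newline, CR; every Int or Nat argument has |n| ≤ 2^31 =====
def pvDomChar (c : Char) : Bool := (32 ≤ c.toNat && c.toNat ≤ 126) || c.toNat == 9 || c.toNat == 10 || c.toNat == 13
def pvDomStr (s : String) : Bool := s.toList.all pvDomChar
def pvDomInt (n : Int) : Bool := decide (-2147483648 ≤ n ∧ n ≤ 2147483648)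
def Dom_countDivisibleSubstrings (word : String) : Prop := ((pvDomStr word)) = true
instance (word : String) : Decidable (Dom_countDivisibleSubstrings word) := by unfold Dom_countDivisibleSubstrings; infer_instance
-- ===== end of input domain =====

-- B replaces A's quadratic scan of all substrings by one pass per average k in 1..9,
-- counting equal prefix sums of (value − k) with a hash map (objective: faster).

-- ===== PORT A =====
def pvDicA : PySem.Dict Char Int := PySem.Dict.mk [('a',1),('b',1),('c',2),('d',2),('e',2),('f',3),('g',3),('h',3),('i',4),('j',4),('k',4),('l',5),('m',5),('n',5),('o',6),('p',6),('q',6),('r',7),('s',7),('t',7),('u',8),('v',8),('w',8),('x',9),('y',9),('z',9)]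

def countDivisibleSubstrings (word : String) : Int :=
  let cs := word.toList
  let n : Int := PySem.Str.len word
  (PySem.List.pyRange 0 n 1).foldl (fun res i =>
    ((PySem.List.pyRange i n 1).foldl (fun (st : Int × Int) j =>
      -- dic[word[j]]: the .getD defaults are unreachable under Pre_ (index in range, key present)
      let rc := st.1 + (PySem.Dict.get? pvDicA ((PySem.List.pyGet? cs j).getD ' ')).getD 0
      let len : Int := (PySem.List.slice cs (some i) (some (j+1))).length
      if PySem.Int.mod rc len == 0 then (rc, st.2 + 1) else (rc, st.2)) (0, res)).2) 0

-- ===== PORT B =====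
def countDivisibleSubstrings_alt (word : String) : Int :=
  let vals : List Int := word.toList.map (fun c => PySem.Int.floordiv ((c.toNat : Int) - 96) 3 + 1)
  (PySem.List.pyRange 1 10 1).foldl (fun res k =>
    (vals.foldl (fun (st : PySem.Dict Int Int × Int × Int) v =>
      let p := st.2.1 + (v - k)
      let r := st.2.2 + PySem.Dict.getD st.1 p 0
      (PySem.Dict.insert st.1 p (PySem.Dict.getD st.1 p 0 + 1), p, r))
      (PySem.Dict.mk [(0,1)], 0, res)).2.2) 0

-- ===== PRECONDITION & SPEC =====
-- Pre_ excludes exactly the inputs on which A raises KeyError: any character outside 'a'..'z'.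
def Pre_countDivisibleSubstrings (word : String) : Prop := word.toList.all (fun c => 'a' ≤ c && c ≤ 'z') = true
instance (word : String) : Decidable (Pre_countDivisibleSubstrings word) := by unfold Pre_countDivisibleSubstrings; infer_instance
def pvWitness_countDivisibleSubstrings : String := "aza"

def Spec_countDivisibleSubstrings (word : String) (out : Int) : Prop := out = countDivisibleSubstrings_alt word
instance (word : String) (out : Int) : Decidable (Spec_countDivisibleSubstrings word out) := by unfold Spec_countDivisibleSubstrings; infer_instance

-- ===== CLAIM (what is proved, stated in full; the proofs are below) =====
def Claim_equal_countDivisibleSubstrings : Prop := ∀ (word : String), Dom_countDivisibleSubstrings word → Pre_countDivisibleSubstrings word → Spec_countDivisibleSubstrings word (countDivisibleSubstrings word)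

-- ===== LEMMAS AND PROOFS =====

-- the letter value, as B computes it
def pvVal (c : Char) : Int := PySem.Int.floordiv ((c.toNat : Int) - 96) 3 + 1
-- prefix sum of the value list
def pvP (l : List Int) (m : Nat) : Int := (l.take m).sum
-- B's shifted prefix sum for average k
def pvQ (l : List Int) (k : Int) (m : Nat) : Int := pvP l m - k * m
-- B's counter after the first t+1 shifted prefix sums
def pvC (l : List Int) (k : Int) (t : Nat) : PySem.Dict Int Int :=
  ((List.range (t+1)).map (pvQ l k)).foldl (fun d x => PySem.Dict.insert d x (PySem.Dict.getD d x 0 + 1)) PySem.Dict.empty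

lemma pvDic_eq_val (c : Char) (h1 : 'a' ≤ c) (h2 : c ≤ 'z') :
    (PySem.Dict.get? pvDicA c).getD 0 = pvVal c := by
  have hb : 97 ≤ c.toNat ∧ c.toNat ≤ 122 := by
    simp [Char.le_def] at h1 h2; exact ⟨h1, h2⟩
  obtain ⟨m, hm⟩ : ∃ m, c.toNat = m := ⟨_, rfl⟩
  rw [hm] at hb
  have hc : c = Char.ofNat m := by rw [← hm]; exact (Char.ofNat_toNat c).symm
  subst hc
  obtain ⟨hb1, hb2⟩ := hb
  interval_cases m <;> decide

lemma pvVal_bounds (c : Char) (h1 : 'a' ≤ c) (h2 : c ≤ 'z') : 1 ≤ pvVal c ∧ pvVal c ≤ 9 := by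
  have hb : 97 ≤ c.toNat ∧ c.toNat ≤ 122 := by
    simp [Char.le_def] at h1 h2; exact ⟨h1, h2⟩
  unfold pvVal
  rw [PySem.Int.floordiv_eq_ediv_of_pos (by norm_num)]
  omega

lemma pvP_succ (l : List Int) (t : Nat) (ht : t < l.length) :
    pvP l (t + 1) = pvP l t + l[t] := List.sum_take_succ l t ht

lemma pvSum_bounds (l : List Int) (hv : ∀ v ∈ l, 1 ≤ v ∧ v ≤ 9) (a t : Nat)
    (hat : a ≤ t) (htn : t < l.length) :
    ((t : Int) - a + 1) ≤ pvP l (t+1) - pvP l a ∧ pvP l (t+1) - pvP l a ≤ 9 * ((t : Int) - a + 1) := by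
  induction t, hat using Nat.le_induction with
  | base =>
      have := hv l[a] (List.getElem_mem htn)
      rw [pvP_succ l a htn]
      constructor <;> omega
  | succ t hat ih =>
      have h1 : t < l.length := by omega
      have := hv l[t+1] (List.getElem_mem htn)
      have := ih h1
      rw [pvP_succ l (t+1) htn]
      push_cast at *
      constructor <;> omega

-- A's inner loop over j, as an indicator sum
lemma pvA_inner (cs : List Char) (hp : ∀ c ∈ cs, 'a' ≤ c ∧ c ≤ 'z') (i : Nat) (d : Nat) :
    ∀ (t : Nat) (res : Int), i ≤ t → t + d = cs.length →
    ((PySem.List.pyRange (t : Int) (cs.length : Int)).foldl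
      (fun (st : Int × Int) j =>
        let rc := st.1 + (PySem.Dict.get? pvDicA ((PySem.List.pyGet? cs j).getD ' ')).getD 0
        let len : Int := (PySem.List.slice cs (some (i : Int)) (some (j+1))).length
        if PySem.Int.mod rc len == 0 then (rc, st.2 + 1) else (rc, st.2))
      (pvP (cs.map pvVal) t - pvP (cs.map pvVal) i, res)).2
    = res + ∑ j ∈ Finset.Ico t cs.length,
        (if ((j:Int) - i + 1) ∣ (pvP (cs.map pvVal) (j+1) - pvP (cs.map pvVal) i) then (1:Int) else 0) := by
  induction d with
  | zero =>
      intro t res hit htn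
      have ht : t = cs.length := by omega
      subst ht
      rw [PySem.List.pyRange_one_eq_nil (by omega)]
      simp
  | succ d ih =>
      intro t res hit htn
      have htlt : t < cs.length := by omega
      rw [PySem.List.pyRange_one_cons (by exact_mod_cast htlt), List.foldl_cons]
      have hmem : cs[t] ∈ cs := List.getElem_mem htlt
      have hget : (PySem.List.pyGet? cs (t : Int)).getD ' ' = cs[t] := by
        rw [PySem.List.pyGet?_natCast, List.getElem?_eq_getElem htlt]; rfl
      have hdic := pvDic_eq_val cs[t] (hp _ hmem).1 (hp _ hmem).2
      have hlt' : t < (cs.map pvVal).length := by simpa using htlt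
      have hrc : pvP (cs.map pvVal) t - pvP (cs.map pvVal) i
          + (PySem.Dict.get? pvDicA ((PySem.List.pyGet? cs (t : Int)).getD ' ')).getD 0
          = pvP (cs.map pvVal) (t+1) - pvP (cs.map pvVal) i := by
        rw [hget, hdic, pvP_succ _ t hlt']
        rw [List.getElem_map]
        ring
      have hslice : ((PySem.List.slice cs (some (i : Int)) (some ((t:Int)+1))).length : Int)
          = (t : Int) - i + 1 := by
        have : ((t:Int)+1) = ((t+1 : Nat) : Int) := by push_cast; ring
        rw [this, PySem.List.slice_natCast]
        simp [List.length_take, List.length_drop]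
        omega
      simp only [hrc, hslice]
      rw [Finset.sum_eq_sum_Ico_succ_bot htlt]
      have hcast : ((t:Int)+1) = ((t+1:Nat):Int) := by push_cast; ring
      by_cases hdvd : ((t:Int) - (i:Int) + 1) ∣ (pvP (List.map pvVal cs) (t+1) - pvP (List.map pvVal cs) i)
      · have hm : PySem.Int.mod (pvP (List.map pvVal cs) (t + 1) - pvP (List.map pvVal cs) i) ((t:Int) - (i:Int) + 1) = 0 :=
          (PySem.Int.mod_eq_zero_iff_dvd _ _).mpr hdvd
        rw [hm, if_pos (by rfl), hcast, ih (t+1) (res+1) (by omega) (by omega), if_pos hdvd]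
        ring
      · have hm : PySem.Int.mod (pvP (List.map pvVal cs) (t + 1) - pvP (List.map pvVal cs) i) ((t:Int) - (i:Int) + 1) ≠ 0 :=
          fun h => hdvd ((PySem.Int.mod_eq_zero_iff_dvd _ _).mp h)
        rw [if_neg (by simpa using hm), hcast, ih (t+1) res (by omega) (by omega), if_neg hdvd]
        ring

-- A as a double indicator sum over substrings
lemma pvA_eq_sum (word : String) (hp : ∀ c ∈ word.toList, 'a' ≤ c ∧ c ≤ 'z') :
    countDivisibleSubstrings word =
      ∑ i ∈ Finset.range word.toList.length, ∑ j ∈ Finset.Ico i word.toList.length,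
        (if ((j : Int) - i + 1) ∣ (pvP (word.toList.map pvVal) (j+1) - pvP (word.toList.map pvVal) i)
         then (1 : Int) else 0) := by
  unfold countDivisibleSubstrings
  simp only [PySem.Str.len_eq]
  rw [PySem.List.pyRange_zero_natCast, List.foldl_map]
  rw [PySem.List.foldl_congr_mem _ _
    (fun res i => res + ∑ j ∈ Finset.Ico i word.toList.length,
      (if ((j : Int) - i + 1) ∣ (pvP (word.toList.map pvVal) (j+1) - pvP (word.toList.map pvVal) i)
       then (1 : Int) else 0)) 0 ?_]
  · rw [PySem.List.foldl_add, zero_add]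
    rfl
  · intro acc x hx
    have hx' : x < word.toList.length := List.mem_range.mp hx
    have h := pvA_inner word.toList hp x (word.toList.length - x) x acc (le_refl x) (by omega)
    rw [sub_self] at h
    exact h

lemma pvC_succ (l : List Int) (k : Int) (t : Nat) :
    pvC l k (t+1) = PySem.Dict.insert (pvC l k t) (pvQ l k (t+1)) (PySem.Dict.getD (pvC l k t) (pvQ l k (t+1)) 0 + 1) := by
  unfold pvC
  rw [List.range_succ, List.map_append, List.foldl_append]
  rfl

lemma pvC_getD (l : List Int) (k : Int) (t : Nat) (x : Int) :
    PySem.Dict.getD (pvC l k t) x 0 = (((List.range (t+1)).map (pvQ l k)).count x : Int) := by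
  unfold pvC
  rw [PySem.Dict.getD_foldl_insert_add_one]
  simp

-- B's inner loop: the counter pass counts equal shifted prefix sums
lemma pvB_inner (l : List Int) (k : Int) (d : Nat) :
    ∀ (t : Nat) (res : Int), t + d = l.length →
    ((l.drop t).foldl (fun (st : PySem.Dict Int Int × Int × Int) v =>
        let p := st.2.1 + (v - k)
        let r := st.2.2 + PySem.Dict.getD st.1 p 0
        (PySem.Dict.insert st.1 p (PySem.Dict.getD st.1 p 0 + 1), p, r))
      (pvC l k t, pvQ l k t, res)).2.2
    = res + ∑ u ∈ Finset.Ico t l.length, (((List.range (u+1)).map (pvQ l k)).count (pvQ l k (u+1)) : Int) := by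
  induction d with
  | zero =>
      intro t res htn
      have ht : t = l.length := by omega
      subst ht
      simp
  | succ d ih =>
      intro t res htn
      have htlt : t < l.length := by omega
      rw [List.drop_eq_getElem_cons htlt, List.foldl_cons]
      have hq : pvQ l k t + (l[t] - k) = pvQ l k (t+1) := by
        unfold pvQ
        rw [pvP_succ l t htlt]
        push_cast
        ring
      simp only [hq]
      rw [show PySem.Dict.insert (pvC l k t) (pvQ l k (t+1)) (PySem.Dict.getD (pvC l k t) (pvQ l k (t+1)) 0 + 1) = pvC l k (t+1) from (pvC_succ l k t).symm]
      rw [ih (t+1) _ (by omega)]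
      rw [Finset.sum_eq_sum_Ico_succ_bot htlt, pvC_getD]
      ring

lemma pvCount_eq_sum (m : Nat) (Q : Nat → Int) (x : Int) :
    (((List.range m).map Q).count x : Int) = ∑ a ∈ Finset.range m, (if Q a = x then (1:Int) else 0) := by
  induction m with
  | zero => simp
  | succ m ih =>
      rw [List.range_succ, List.map_append, List.count_append, Finset.sum_range_succ, Nat.cast_add, ih]
      by_cases h : Q m = x <;> simp [h]

-- B as a triple indicator sum
lemma pvB_eq_sum (word : String) :
    countDivisibleSubstrings_alt word =
      ∑ t ∈ Finset.range (word.toList.map pvVal).length, ∑ a ∈ Finset.range (t+1), ∑ x ∈ Finset.range 9,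
        (if pvQ (word.toList.map pvVal) ((x:Int)+1) a = pvQ (word.toList.map pvVal) ((x:Int)+1) (t+1)
         then (1:Int) else 0) := by
  unfold countDivisibleSubstrings_alt
  rw [show PySem.List.pyRange (1:Int) 10 = [(1:Int),2,3,4,5,6,7,8,9] from by decide]
  have hval : (fun c : Char => PySem.Int.floordiv ((c.toNat : Int) - 96) 3 + 1) = pvVal := rfl
  rw [hval]
  set l : List Int := word.toList.map pvVal with hl
  rw [PySem.List.foldl_congr_mem _ _
    (fun res k => res + ∑ u ∈ Finset.Ico 0 l.length,
      (((List.range (u+1)).map (pvQ l k)).count (pvQ l k (u+1)) : Int)) 0 ?_]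
  · rw [PySem.List.foldl_add, zero_add]
    rw [show ∀ G : Int → Int, ([(1:Int),2,3,4,5,6,7,8,9].map G).sum = ∑ x ∈ Finset.range 9, G ((x:Int)+1) from fun G => by simp [Finset.sum_range_succ]; ring]
    simp only [← Finset.range_eq_Ico, pvCount_eq_sum]
    rw [Finset.sum_comm]
    apply Finset.sum_congr rfl
    intro t _
    rw [Finset.sum_comm]
  · intro acc k hk
    have h0 : pvQ l k 0 = 0 := by unfold pvQ pvP; simp
    have hC0 : pvC l k 0 = PySem.Dict.mk [((0:Int),(1:Int))] := by
      unfold pvC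
      rw [show (List.range 1).map (pvQ l k) = [pvQ l k 0] from by simp, h0]
      decide
    have h := pvB_inner l k l.length 0 acc (by omega)
    rw [List.drop_zero, hC0, h0] at h
    rw [h]

lemma pvQ_eq_iff (l : List Int) (k : Int) (a t : Nat) :
    (pvQ l k a = pvQ l k (t+1)) ↔ (pvP l (t+1) - pvP l a = k * ((t:Int) - a + 1)) := by
  unfold pvQ
  push_cast
  constructor <;> intro h <;> linear_combination -h

-- divisibility of the sum S of len values each in [1,9] is witnessed by exactly one average in 1..9
lemma pvBridge9 (S len : Int) (h1 : len ≤ S) (h9 : S ≤ 9 * len) (hlen : 0 < len) :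
    (∑ x ∈ Finset.range 9, (if S = ((x:Int)+1) * len then (1:Int) else 0)) =
      (if len ∣ S then (1 : Int) else 0) := by
  by_cases hd : len ∣ S
  · obtain ⟨q, hq⟩ := hd
    have hq1 : 1 ≤ q := by nlinarith
    have hq9 : q ≤ 9 := by nlinarith
    have hcond : ∀ x : Nat, (S = ((x:Int)+1) * len) ↔ (x = (q-1).toNat) := by
      intro x
      constructor
      · intro h
        rw [hq, mul_comm _ len] at h
        have := mul_left_cancel₀ (ne_of_gt hlen) h
        omega
      · intro h
        subst h
        rw [hq]
        have hx : (((q-1).toNat : Int)+1) = q := by omega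
        rw [hx]
        ring
    simp only [hcond]
    rw [Finset.sum_ite_eq' (Finset.range 9) ((q-1).toNat) (fun _ => (1:Int))]
    rw [if_pos (Finset.mem_range.mpr (by omega)), if_pos ⟨q, hq⟩]
  · rw [if_neg hd]
    apply Finset.sum_eq_zero
    intro x _
    rw [if_neg]
    intro h
    exact hd ⟨(x:Int)+1, by rw [h]; ring⟩

lemma pvFinal (word : String) (hp : ∀ c ∈ word.toList, 'a' ≤ c ∧ c ≤ 'z') :
    countDivisibleSubstrings word = countDivisibleSubstrings_alt word := by
  rw [pvA_eq_sum word hp, pvB_eq_sum word]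
  have hv : ∀ v ∈ word.toList.map pvVal, 1 ≤ v ∧ v ≤ 9 := by
    intro v hvm
    obtain ⟨c, hc, rfl⟩ := List.mem_map.mp hvm
    exact pvVal_bounds c (hp c hc).1 (hp c hc).2
  set l := word.toList.map pvVal with hl
  have hlen : l.length = word.toList.length := by rw [hl, List.length_map]
  rw [hlen]
  set n := word.toList.length with hn
  have step1 : ∀ t ∈ Finset.range n, ∀ a ∈ Finset.range (t+1),
      (if ((t:Int) - a + 1) ∣ (pvP l (t+1) - pvP l a) then (1:Int) else 0)
      = ∑ x ∈ Finset.range 9, (if pvQ l ((x:Int)+1) a = pvQ l ((x:Int)+1) (t+1) then (1:Int) else 0) := by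
    intro t ht a ha
    have hat : a ≤ t := by have := Finset.mem_range.mp ha; omega
    have htn : t < l.length := by rw [hlen]; exact Finset.mem_range.mp ht
    have hb := pvSum_bounds l hv a t hat htn
    have hiff : ∀ x : Nat, (pvQ l ((x:Int)+1) a = pvQ l ((x:Int)+1) (t+1))
        ↔ (pvP l (t+1) - pvP l a = ((x:Int)+1) * ((t:Int) - a + 1)) := fun x => pvQ_eq_iff l _ a t
    simp only [hiff]
    exact (pvBridge9 (pvP l (t+1) - pvP l a) ((t:Int) - a + 1) hb.1 hb.2 (by omega)).symm
  calc ∑ i ∈ Finset.range n, ∑ j ∈ Finset.Ico i n,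
        (if ((j:Int) - i + 1) ∣ (pvP l (j+1) - pvP l i) then (1:Int) else 0)
      = ∑ t ∈ Finset.range n, ∑ a ∈ Finset.range (t+1),
        (if ((t:Int) - a + 1) ∣ (pvP l (t+1) - pvP l a) then (1:Int) else 0) := by
        simp only [Finset.range_eq_Ico]
        exact Finset.sum_Ico_Ico_comm 0 n (fun a t => if ((t:Int) - a + 1) ∣ (pvP l (t+1) - pvP l a) then (1:Int) else 0)
    _ = ∑ t ∈ Finset.range n, ∑ a ∈ Finset.range (t+1), ∑ x ∈ Finset.range 9,
        (if pvQ l ((x:Int)+1) a = pvQ l ((x:Int)+1) (t+1) then (1:Int) else 0) := by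
        exact Finset.sum_congr rfl (fun t ht => Finset.sum_congr rfl (fun a ha => step1 t ht a ha))

-- ===== VERDICT (by name: the statement is the Claim_ definition above) =====
theorem countDivisibleSubstrings_spec : Claim_equal_countDivisibleSubstrings := by
  intro word hdom hp
  unfold Pre_countDivisibleSubstrings at hp
  simp only [List.all_eq_true, Bool.and_eq_true, decide_eq_true_eq] at hp
  unfold Spec_countDivisibleSubstrings
  exact pvFinal word hp
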